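-- pv_equiv track=rewrite | github.com/uddaniiii/coding-test | 프로그래머스/1/17681. ［1차］ 비밀지도/［1차］ 비밀지도.py | solution
-- ===== SOURCE A (Python) =====
-- def solution(n, arr1, arr2):
--     res1=[]
--     for a in arr1:
--         res1.append(bin(a)[2:].rjust(n,'0'))
--     res2=[]
--     for a in arr2:
--         res2.append(bin(a)[2:].rjust(n,'0'))
--
--     answer=[]
--     for i in range(len(res1)):
--         hash=''
--         for j in range(len(res1[0])):
--             if int(res1[i][j]) | int(res2[i][j]):
--                 hash+='#'
--             else:
--                 hash+=' '
--
--         answer.append(hash)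
--     return answer
-- ===== SOURCE B (Python) =====
-- def solution(n, arr1, arr2):
--     sym = {'1': '#', '0': ' '}
--     answer = []
--     for i, a in enumerate(arr1):
--         s = bin(a | arr2[i])[2:].rjust(n, '0')
--         answer.append(''.join(sym[c] for c in s))
--     return answer
-- ===== Notes on version B (the rewrite author's own statement) =====
-- stated objective: simpler
-- what changed: B drops A's separate binary-padding of both arrays and the nested per-character int()|int() comparison: it ORs the two integers of each row once, formats that single value as one n-wide binary string, and translates digits to symbols with a dict lookup. (measured faster: one int OR and one join per row instead of per-character int() parsing and string += concatenation)
-- outside the precondition, e.g. on solution(2, [1, 4], [2, 1]): A returns ['##', '##'], B returns ['##', '# #']; on solution(0, [1], [3]): A returns ['#'], B returns ['##']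
import Mathlib
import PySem

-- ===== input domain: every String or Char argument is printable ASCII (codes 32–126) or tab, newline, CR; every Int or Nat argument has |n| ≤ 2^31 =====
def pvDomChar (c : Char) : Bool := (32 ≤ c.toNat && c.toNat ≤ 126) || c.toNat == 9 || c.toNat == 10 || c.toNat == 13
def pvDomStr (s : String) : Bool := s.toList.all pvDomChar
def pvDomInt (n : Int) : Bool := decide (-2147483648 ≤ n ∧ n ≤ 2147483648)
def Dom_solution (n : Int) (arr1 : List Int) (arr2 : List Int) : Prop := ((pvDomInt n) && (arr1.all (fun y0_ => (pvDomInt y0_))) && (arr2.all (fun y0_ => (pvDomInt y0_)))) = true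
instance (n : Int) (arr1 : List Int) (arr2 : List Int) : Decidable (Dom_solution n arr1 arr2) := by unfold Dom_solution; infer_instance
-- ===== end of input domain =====

-- B replaces A's binary-string padding of both arrays and the nested per-character int()|int()
-- comparison by a single integer OR per row, one padded binary string, and a digit→symbol
-- dict translation; objective: simpler.

-- ===== PORT A =====
-- bin(m)[2:] digit recursion for m ≥ 1 (empty for 0); exact for nonnegative ints
def pvBits (m : Nat) : List Char :=
  if h : m = 0 then [] else pvBits (m / 2) ++ [if m % 2 = 1 then '1' else '0']
decreasing_by exact Nat.div_lt_self (Nat.pos_of_ne_zero h) (by omega)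

-- bin(a)[2:] for a ≥ 0 (Pre_ excludes negatives, where Python A raises ValueError)
def pvBin (a : Int) : List Char := if a.toNat = 0 then ['0'] else pvBits a.toNat

-- s.rjust(n, '0')
def pvRjust (n : Int) (s : List Char) : List Char := List.replicate (n.toNat - s.length) '0' ++ s

def solution (n : Int) (arr1 : List Int) (arr2 : List Int) : List String :=
  let res1 := arr1.map (fun a => pvRjust n (pvBin a))
  let res2 := arr2.map (fun a => pvRjust n (pvBin a))
  (List.range res1.length).map (fun i =>
    String.mk ((List.range (res1.headD []).length).map (fun j =>
      -- int(res1[i][j]) | int(res2[i][j]); indices in range under Pre_solution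
      if Int.lor (if (res1.getD i []).getD j '0' = '1' then (1 : Int) else 0)
                 (if (res2.getD i []).getD j '0' = '1' then (1 : Int) else 0) ≠ 0
      then '#' else ' ')))

-- ===== PORT B =====
def solution_alt (n : Int) (arr1 : List Int) (arr2 : List Int) : List String :=
  (PySem.List.enumerate arr1).map (fun p =>
    let v : Int := Int.lor p.2 (PySem.List.pyGetD arr2 p.1 0)   -- a | arr2[i]; in range under Pre_solution
    -- sym[c] lookup on bin(v)[2:].rjust(n,'0'); under Pre_solution every character is '1' or '0'
    -- (Python raises KeyError otherwise, excluded by Pre_solution)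
    String.mk ((pvRjust n (pvBin v)).map (fun c => if c = '1' then '#' else ' ')))

-- ===== PRECONDITION & SPEC =====
-- Pre_ excludes (unless arr1 is empty, where both return []): negative entries in the used rows
-- (A raises ValueError on bin(a)[2:] parsing), used entries ≥ 2^n and n ≤ 0 (A's row width is then
-- len(res1[0]) ≠ n: A raises IndexError or returns rows of A's accidental width, a
-- defensible-corner artefact of padding both arrays separately), and len(arr2) < len(arr1)
-- (A raises IndexError).
def Pre_solution (n : Int) (arr1 : List Int) (arr2 : List Int) : Prop :=
  arr1 = [] ∨
    (1 ≤ n ∧ arr1.length ≤ arr2.length ∧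
      ∀ i : Nat, i < arr1.length →
        0 ≤ arr1.getD i 0 ∧ arr1.getD i 0 < 2 ^ n.toNat ∧
        0 ≤ arr2.getD i 0 ∧ arr2.getD i 0 < 2 ^ n.toNat)
instance (n : Int) (arr1 : List Int) (arr2 : List Int) : Decidable (Pre_solution n arr1 arr2) := by
  unfold Pre_solution; infer_instance

def pvWitness_solution : Int × List Int × List Int := (31, [9, 20, 28, 18, 11], [30, 1, 21, 17, 28])

def Spec_solution (n : Int) (arr1 : List Int) (arr2 : List Int) (out : List String) : Prop := out = solution_alt n arr1 arr2
instance (n : Int) (arr1 : List Int) (arr2 : List Int) (out : List String) : Decidable (Spec_solution n arr1 arr2 out) := by unfold Spec_solution; infer_instance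

-- ===== CLAIM (what is proved, stated in full; the proofs are below) =====
def Claim_equal_solution : Prop := ∀ (n : Int) (arr1 : List Int) (arr2 : List Int), Dom_solution n arr1 arr2 → Pre_solution n arr1 arr2 → Spec_solution n arr1 arr2 (solution n arr1 arr2)

-- ===== LEMMAS AND PROOFS =====

-- the width-k big-endian bit string of m
def fullBits (k m : Nat) : List Char :=
  (List.range k).map (fun j => if m.testBit (k - 1 - j) then '1' else '0')

theorem fullBits_length (k m : Nat) : (fullBits k m).length = k := by
  simp [fullBits]

theorem fullBits_zero (k : Nat) : fullBits k 0 = List.replicate k '0' := by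
  simp [fullBits, List.map_const']

theorem fullBits_succ (k m : Nat) :
    fullBits (k + 1) m = fullBits k (m / 2) ++ [if m % 2 = 1 then '1' else '0'] := by
  unfold fullBits
  rw [List.range_succ, List.map_append]
  congr 1
  · exact List.map_congr_left (fun j hj => by
      have hj' : j < k := List.mem_range.mp hj
      have : k + 1 - 1 - j = (k - 1 - j) + 1 := by omega
      rw [this, Nat.testBit_add_one])
  · simp [Nat.testBit_zero]

theorem pvBits_pad (k : Nat) : ∀ m : Nat, 1 ≤ m → m < 2 ^ k →
    List.replicate (k - (pvBits m).length) '0' ++ pvBits m = fullBits k m := by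
  induction k with
  | zero => intro m h1 h2; omega
  | succ k ih =>
    intro m h1 h2
    rw [pvBits, dif_neg (by omega)]
    by_cases hm : m / 2 = 0
    · have hm1 : m = 1 := by omega
      subst hm1
      rw [fullBits_succ]
      simp [hm, pvBits, fullBits_zero]
    · have h2' : m / 2 < 2 ^ k := by
        have hpow : 2 ^ (k + 1) = 2 * 2 ^ k := by ring
        omega
      have := ih (m / 2) (by omega) h2'
      rw [fullBits_succ, ← this, List.append_assoc]
      congr 2
      simp only [List.length_append, List.length_singleton]
      omega

theorem row_eq (n a : Int) (hn : 1 ≤ n) (ha : 0 ≤ a) (ha2 : a < 2 ^ n.toNat) :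
    pvRjust n (pvBin a) = fullBits n.toNat a.toNat := by
  have hlt : a.toNat < 2 ^ n.toNat := by
    have : ((2 ^ n.toNat : Nat) : Int) = (2 : Int) ^ n.toNat := by push_cast; ring
    omega
  unfold pvRjust pvBin
  by_cases h0 : a.toNat = 0
  · rw [if_pos h0, h0, fullBits_zero]
    have h1 : 1 ≤ n.toNat := by omega
    have : n.toNat = (n.toNat - 1) + 1 := by omega
    rw [this, List.replicate_succ']
    simp
  · rw [if_neg h0]
    exact pvBits_pad n.toNat a.toNat (by omega) hlt

theorem fullBits_getD (k m j : Nat) (hj : j < k) :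
    (fullBits k m).getD j '0' = if m.testBit (k - 1 - j) then '1' else '0' := by
  unfold fullBits
  rw [List.getD_eq_getElem _ _ (by simpa using hj)]
  simp

-- ===== VERDICT (by name: the statement is the Claim_ definition above) =====
theorem solution_spec : Claim_equal_solution := by
  intro n arr1 arr2 _hdom hpre
  rcases hpre with hnil | ⟨hn, hlen, hb⟩
  · subst hnil
    simp [Spec_solution, solution, solution_alt, PySem.List.enumerate]
  unfold Spec_solution solution solution_alt
  simp only []
  apply List.ext_getElem
  · simp [PySem.List.length_enumerate]
  · intro i hi hi'
    have hi1 : i < arr1.length := by simpa using hi'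
    have hi2 : i < arr2.length := by omega
    -- the two row values
    have hbi := hb i hi1
    rw [List.getD_eq_getElem _ _ hi1, List.getD_eq_getElem _ _ hi2] at hbi
    have ha1 : 0 ≤ arr1[i] ∧ arr1[i] < 2 ^ n.toNat := ⟨hbi.1, hbi.2.1⟩
    have ha2 : 0 ≤ arr2[i] ∧ arr2[i] < 2 ^ n.toNat := ⟨hbi.2.2.1, hbi.2.2.2⟩
    have hrow1 : (arr1.map (fun a => pvRjust n (pvBin a))).getD i [] = fullBits n.toNat arr1[i].toNat := by
      rw [List.getD_eq_getElem _ _ (by simpa using hi1), List.getElem_map]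
      exact row_eq n _ hn ha1.1 ha1.2
    have hrow2 : (arr2.map (fun a => pvRjust n (pvBin a))).getD i [] = fullBits n.toNat arr2[i].toNat := by
      rw [List.getD_eq_getElem _ _ (by simpa using hi2), List.getElem_map]
      exact row_eq n _ hn ha2.1 ha2.2
    -- the width A uses: len(res1[0]) = n.toNat
    have hhead : ((arr1.map (fun a => pvRjust n (pvBin a))).headD []).length = n.toNat := by
      cases arr1 with
      | nil => simp at hi1
      | cons x xs =>
        have hx0 := hb 0 (by simp)
        simp only [List.getD_cons_zero] at hx0
        have hx : 0 ≤ x ∧ x < 2 ^ n.toNat := ⟨hx0.1, hx0.2.1⟩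
        simp only [List.map_cons, List.headD_cons]
        rw [row_eq n x hn hx.1 hx.2, fullBits_length]
    simp only [List.getElem_map, List.getElem_range, PySem.List.getElem_enumerate]
    rw [hrow1, hrow2, hhead]
    -- B's arr2 lookup
    have hget : PySem.List.pyGetD arr2 ((0 : Int) + i) 0 = arr2[i] := by
      have : ((0 : Int) + i) = (i : Int) := by omega
      rw [this, PySem.List.pyGetD_natCast, List.getD_eq_getElem _ _ (by simpa using hi2)]
    rw [hget]
    -- B's row: the padded binary string of the OR
    have hor : Int.lor arr1[i] arr2[i] = ((arr1[i].toNat ||| arr2[i].toNat : Nat) : Int) := by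
      conv_lhs => rw [← Int.toNat_of_nonneg ha1.1, ← Int.toNat_of_nonneg ha2.1]
      rfl
    have hcast : ((2 ^ n.toNat : Nat) : Int) = (2 : Int) ^ n.toNat := by push_cast; ring
    have hvlt : arr1[i].toNat ||| arr2[i].toNat < 2 ^ n.toNat :=
      Nat.or_lt_two_pow (by omega) (by omega)
    have hvrow : pvRjust n (pvBin (Int.lor arr1[i] arr2[i]))
        = fullBits n.toNat (arr1[i].toNat ||| arr2[i].toNat) := by
      rw [hor]
      have := row_eq n ((arr1[i].toNat ||| arr2[i].toNat : Nat) : Int) hn (by positivity)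
        (by rw [← hcast]; exact_mod_cast hvlt)
      simpa using this
    rw [hvrow]
    congr 1
    -- both characters are determined by the same testBit of the OR
    apply List.ext_getElem
    · simp [fullBits]
    intro j hj hj'
    have hjk : j < n.toNat := by simpa using hj
    rw [List.getElem_map, List.getElem_map, List.getElem_range,
      fullBits_getD _ _ _ hjk, fullBits_getD _ _ _ hjk]
    have hlenfb : j < (fullBits n.toNat (arr1[i].toNat ||| arr2[i].toNat)).length := by
      rw [fullBits_length]; exact hjk
    have hfb : (fullBits n.toNat (arr1[i].toNat ||| arr2[i].toNat))[j]'hlenfb =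
        if (arr1[i].toNat ||| arr2[i].toNat).testBit (n.toNat - 1 - j) then '1' else '0' := by
      rw [← List.getD_eq_getElem _ '0', fullBits_getD _ _ _ hjk]
    rw [hfb, Nat.testBit_or]
    rcases hb1 : arr1[i].toNat.testBit (n.toNat - 1 - j) <;>
      rcases hb2 : arr2[i].toNat.testBit (n.toNat - 1 - j) <;>
      simp [hb1, hb2] <;> decide
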